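-- pv_equiv track=rewrite | github.com/fjguaita/codesignal | test5.py | check_unique
-- ===== SOURCE A (Python) =====
-- def check_unique(nums):
--     s = set()
--     for num in nums:
--         if num == '.':
--             continue
--
--         if num in s:
--             return False
--         s.add(num)
--     return True
-- ===== SOURCE B (Python) =====
-- def check_unique(nums):
--     filtered = sorted(x for x in nums if x != '.')
--     return all(a != b for a, b in zip(filtered, filtered[1:]))
-- ===== Notes on version B (the rewrite author's own statement) =====
-- stated objective: alternative
-- what changed: Replaces the running-set membership loop with early return by a sort-then-scan algorithm: sort the non-dot elements and check that no two adjacent elements of the sorted list are equal; no set and no membership test is used.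
import Mathlib
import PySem

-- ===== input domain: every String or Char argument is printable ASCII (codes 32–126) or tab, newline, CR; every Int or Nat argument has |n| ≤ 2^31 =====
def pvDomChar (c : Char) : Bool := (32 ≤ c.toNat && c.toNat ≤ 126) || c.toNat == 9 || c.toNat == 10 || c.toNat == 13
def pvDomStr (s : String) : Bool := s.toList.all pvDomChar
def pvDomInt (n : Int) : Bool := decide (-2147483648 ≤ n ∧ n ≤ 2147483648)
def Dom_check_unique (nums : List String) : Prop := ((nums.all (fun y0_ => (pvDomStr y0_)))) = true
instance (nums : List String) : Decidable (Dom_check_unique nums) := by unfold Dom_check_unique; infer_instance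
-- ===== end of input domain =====

-- B replaces A's running-set loop with early return by sort-then-scan: sort the
-- non-dot elements, then check no adjacent pair is equal; objective: alternative.

-- ===== PORT A =====
-- loop of A: running set s, early return False on a repeated non-dot element
def check_unique_loop : List String → PySem.Set String → Bool
  | [], _ => true
  | num :: rest, s =>
      if num == "." then check_unique_loop rest s
      else if PySem.Set.contains s num then false
      else check_unique_loop rest (PySem.Set.add s num)

def check_unique (nums : List String) : Bool :=
  check_unique_loop nums PySem.Set.empty

-- ===== PORT B =====
def check_unique_alt (nums : List String) : Bool :=
  let filtered := PySem.List.sorted (nums.filter (fun x => !(x == "."))) (fun x => x) false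
  (filtered.zip filtered.tail).all (fun p => !(p.1 == p.2))

-- ===== PRECONDITION & SPEC =====
def Spec_check_unique (nums : List String) (out : Bool) : Prop := out = check_unique_alt nums
instance (nums : List String) (out : Bool) : Decidable (Spec_check_unique nums out) := by unfold Spec_check_unique; infer_instance

-- ===== CLAIM =====
def Claim_equal_check_unique : Prop := ∀ (nums : List String), Dom_check_unique nums → Spec_check_unique nums (check_unique nums)

-- ===== LEMMAS AND PROOFS =====

-- A's loop decides: the remaining non-dot elements are duplicate-free and fresh w.r.t. the running set
theorem loop_eq (l : List String) (s : PySem.Set String) :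
    check_unique_loop l s =
      decide ((l.filter (fun x => !(x == "."))).Nodup ∧
              ∀ x ∈ l.filter (fun x => !(x == ".")), x ∉ s) := by
  induction l generalizing s with
  | nil => simp [check_unique_loop]
  | cons num rest ih =>
      by_cases hdot : num = "."
      · subst hdot
        simpa [check_unique_loop] using ih s
      · have hb : (num == ".") = false := by simp [hdot]
        have hfil : (num :: rest).filter (fun x => !(x == ".")) =
            num :: rest.filter (fun x => !(x == ".")) := by
          simp [hb]
        rw [hfil]
        by_cases hmem : num ∈ s
        · have hc : PySem.Set.contains s num = true := (PySem.Set.contains_iff s num).mpr hmem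
          simp only [check_unique_loop, hb, Bool.false_eq_true, if_false, hc, if_true]
          symm
          simp only [decide_eq_false_iff_not]
          rintro ⟨_, hall⟩
          exact (hall num (List.mem_cons_self ..)) hmem
        · have hc : PySem.Set.contains s num = false := by
            rw [Bool.eq_false_iff]
            intro h
            exact hmem ((PySem.Set.contains_iff s num).mp h)
          simp only [check_unique_loop, hb, Bool.false_eq_true, if_false, hc, ih]
          congr 1
          simp only [eq_iff_iff, List.nodup_cons]
          constructor
          · rintro ⟨hnd, hall⟩
            refine ⟨⟨fun hnr => ?_, hnd⟩, ?_⟩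
            · exact (hall num hnr) ((PySem.Set.mem_add s num num).mpr (Or.inr rfl))
            · intro y hy
              rcases List.mem_cons.mp hy with rfl | hy'
              · exact hmem
              · intro hys
                exact (hall y hy') ((PySem.Set.mem_add s num y).mpr (Or.inl hys))
          · rintro ⟨⟨hnr, hnd⟩, hall⟩
            refine ⟨hnd, fun y hy hya => ?_⟩
            rcases (PySem.Set.mem_add s num y).mp hya with h | rfl
            · exact (hall y (List.mem_cons_of_mem num hy)) h
            · exact hnr hy

-- the adjacent-pair scan over zip(l, l.tail) decides IsChain (· ≠ ·)
theorem zip_all_ne_iff (l : List String) :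
    ((l.zip l.tail).all (fun p => !(p.1 == p.2)) = true) ↔ l.IsChain (· ≠ ·) := by
  induction l with
  | nil => simp
  | cons a rest ih =>
      cases rest with
      | nil => simp
      | cons b t =>
          rw [List.isChain_cons_cons]
          simp only [List.tail_cons, List.zip_cons_cons, List.all_cons,
            Bool.and_eq_true, Bool.not_eq_eq_eq_not, Bool.not_true,
            beq_eq_false_iff_ne, ne_eq]
          exact and_congr Iff.rfl (by simpa using ih)

-- pointwise conjunction of two adjacent chains
theorem isChain_and {α : Type} {R S : α → α → Prop} :
    ∀ {l : List α}, l.IsChain R → l.IsChain S → l.IsChain (fun a b => R a b ∧ S a b)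
  | [], _, _ => List.isChain_nil
  | [_], _, _ => List.isChain_singleton _
  | _ :: _ :: _, hr, hs => by
      rw [List.isChain_cons_cons] at hr hs ⊢
      exact ⟨⟨hr.1, hs.1⟩, isChain_and hr.2 hs.2⟩

-- on a ≤-sorted list, adjacent-distinct is exactly Nodup
theorem chain_ne_iff_nodup (l : List String) (hs : l.Pairwise (· ≤ ·)) :
    l.IsChain (· ≠ ·) ↔ l.Nodup := by
  constructor
  · intro hc
    have hlt : l.IsChain (· < ·) :=
      (isChain_and hs.isChain hc).imp (fun a b h => lt_of_le_of_ne h.1 h.2)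
    have hp : l.Pairwise (· < ·) := List.isChain_iff_pairwise.mp hlt
    exact hp.imp ne_of_lt
  · intro hnd
    exact hnd.isChain

-- ===== VERDICT =====
theorem check_unique_spec : Claim_equal_check_unique := by
  unfold Claim_equal_check_unique Spec_check_unique
  intro nums _
  unfold check_unique check_unique_alt
  rw [loop_eq]
  set f := nums.filter (fun x => !(x == ".")) with hf
  set g := PySem.List.sorted f (fun x => x) false with hg
  have hperm : g.Perm f := PySem.List.sorted_perm ..
  have hsorted : g.Pairwise (· ≤ ·) := by
    simpa using PySem.List.sorted_pairwise f (fun x => x)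
  have hB : ((g.zip g.tail).all (fun p => !(p.1 == p.2)) = true) ↔ f.Nodup := by
    rw [zip_all_ne_iff g, chain_ne_iff_nodup g hsorted]
    exact hperm.nodup_iff
  by_cases hnd : f.Nodup
  · rw [Bool.eq_iff_iff, hB, decide_eq_true_eq]
    refine ⟨fun _ => hnd, fun _ => ⟨hnd, ?_⟩⟩
    simp [PySem.Set.empty]
  · rw [Bool.eq_iff_iff, hB, decide_eq_true_eq]
    exact ⟨fun h => absurd h.1 hnd, fun h => absurd h hnd⟩
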